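-- pv_equiv track=rewrite | github.com/Caume/HerraduraKEx | SecurityProofsCode/hkex_nl_verification.py | hske_enc_revolve_v2
-- ===== SOURCE A (Python) =====
-- N    = 32
--
-- def rol(x, r, n=N):
--     r %= n; m = (1 << n) - 1
--     return ((x << r) | (x >> (n - r))) & m
--
-- def ror(x, r, n=N):
--     return rol(x, n - r, n)
--
-- def fscx(A, B, n=N):
--     return A ^ B ^ rol(A, 1, n) ^ rol(B, 1, n) ^ ror(A, 1, n) ^ ror(B, 1, n)
--
-- def nl_fscx_v2(A, B, n=N):
--     """
--     Non-linearity from B-only term: the additive offset depends only on B,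
--     so the inverse in A is explicit.  Non-linearity comes from B·(B+1)//2 mod 2^n
--     (triangular number in Z_{2^n}: non-linear in B over GF(2) due to carries).
--     """
--     mask   = (1 << n) - 1
--     xmix   = fscx(A, B, n)
--     offset = rol((B * ((B + 1) >> 1)) & mask, n >> 2, n)  # B-only NL term
--     return (xmix + offset) & mask
--
-- def hske_enc_revolve_v2(P_list, key, r=None, n=N):
--     if r is None: r = n >> 2
--     E_list = []
--     X = key
--     for P in P_list:
--         for _ in range(r):
--             X = nl_fscx_v2(X, key, n)
--         E_list.append(P ^ X)
--     return E_list, X  # return final state for decrypt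
-- ===== SOURCE B (Python) =====
-- N = 32
--
-- def rol(x, r, n=N):
--     r %= n; m = (1 << n) - 1
--     return ((x << r) | (x >> (n - r))) & m
--
-- def ror(x, r, n=N):
--     return rol(x, n - r, n)
--
-- def fscx(A, B, n=N):
--     return A ^ B ^ rol(A, 1, n) ^ rol(B, 1, n) ^ ror(A, 1, n) ^ ror(B, 1, n)
--
-- def nl_fscx_v2(A, B, n=N):
--     mask   = (1 << n) - 1
--     xmix   = fscx(A, B, n)
--     offset = rol((B * ((B + 1) >> 1)) & mask, n >> 2, n)
--     return (xmix + offset) & mask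
--
-- def hske_enc_revolve_v2(P_list, key, r=None, n=N):
--     # Keystream word i+1 is jump^(i+1)(key), where jump advances the state r rounds.
--     # Build the orbit of key under jump with memoized cycle detection: once a state
--     # repeats, the keystream is eventually periodic and later words are read off the
--     # stored orbit by modular indexing instead of being recomputed.
--     if r is None: r = n >> 2
--     m = len(P_list)
--
--     def jump(X):
--         for _ in range(r):
--             X = nl_fscx_v2(X, key, n)
--         return X
--
--     orbit = [key]          # orbit[j] == jump^j(key)
--     seen = {key: 0}
--     cyc = None             # (start, period) once the orbit closes
--     while cyc is None and len(orbit) <= m: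
--         X = jump(orbit[-1])
--         if X in seen:
--             cyc = (seen[X], len(orbit) - seen[X])
--         else:
--             seen[X] = len(orbit)
--             orbit.append(X)
--
--     def word(j):           # jump^j(key), via the orbit (and its cycle if closed)
--         if j < len(orbit):
--             return orbit[j]
--         s, p = cyc
--         return orbit[s + (j - s) % p]
--
--     E_list = [P ^ word(i + 1) for i, P in enumerate(P_list)]
--     return E_list, word(m)
-- ===== Notes on version B (the rewrite author's own statement) =====
-- stated objective: alternative
-- what changed: Instead of re-iterating the round function r times for every plaintext element, B builds the orbit of the key under the r-round jump map with a memo dict and cycle detection, stops as soon as a state repeats, and reads every keystream word (and the final state) off the stored orbit by modular indexing; a separate pass xors the plaintext with those words.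
-- outside the precondition, e.g. on hske_enc_revolve_v2([3], 5, 2, 0): A raises ZeroDivisionError, B raises ZeroDivisionError; on hske_enc_revolve_v2([3], 5, 2, -1): A raises ValueError, B raises ValueError
import Mathlib
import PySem

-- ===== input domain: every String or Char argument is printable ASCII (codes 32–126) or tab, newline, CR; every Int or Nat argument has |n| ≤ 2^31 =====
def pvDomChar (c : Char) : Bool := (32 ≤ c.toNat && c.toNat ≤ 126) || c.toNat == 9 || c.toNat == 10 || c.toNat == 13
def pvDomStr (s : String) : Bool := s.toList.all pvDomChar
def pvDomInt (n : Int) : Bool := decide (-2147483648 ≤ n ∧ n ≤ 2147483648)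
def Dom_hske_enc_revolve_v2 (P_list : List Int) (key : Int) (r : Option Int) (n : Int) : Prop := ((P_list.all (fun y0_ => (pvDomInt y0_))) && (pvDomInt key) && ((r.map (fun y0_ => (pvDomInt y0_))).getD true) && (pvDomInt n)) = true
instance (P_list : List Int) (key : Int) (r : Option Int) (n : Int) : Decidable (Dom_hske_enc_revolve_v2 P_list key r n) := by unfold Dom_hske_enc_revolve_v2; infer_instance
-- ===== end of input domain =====

-- B replaces A's fused per-element re-iteration by a memoized orbit of the state map with
-- cycle detection (the keystream is eventually periodic); objective: alternative algorithm.

-- ===== PORT A =====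
-- shared module helpers (identical in Source A and Source B)
def pvRol (x r n : Int) : Int :=
  let r' := PySem.Int.mod r n
  let m : Int := (1 <<< n.toNat) - 1
  PySem.Int.band (PySem.Int.bor (x <<< r'.toNat) (x >>> (n - r').toNat)) m

def pvRor (x r n : Int) : Int := pvRol x (n - r) n

def pvFscx (A B n : Int) : Int :=
  PySem.Int.bxor (PySem.Int.bxor (PySem.Int.bxor (PySem.Int.bxor (PySem.Int.bxor A B)
    (pvRol A 1 n)) (pvRol B 1 n)) (pvRor A 1 n)) (pvRor B 1 n)

def pvNlFscxV2 (A B n : Int) : Int :=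
  let mask : Int := (1 <<< n.toNat) - 1
  let xmix := pvFscx A B n
  let offset := pvRol (PySem.Int.band (B * ((B + 1) >>> (1 : Nat))) mask) (n >>> (2 : Nat)) n
  PySem.Int.band (xmix + offset) mask

def hske_enc_revolve_v2 (P_list : List Int) (key : Int) (r : Option Int) (n : Int) : List Int × Int :=
  let rv : Int := match r with | none => n >>> (2 : Nat) | some rv => rv
  P_list.foldl (fun (st : List Int × Int) P =>
      let X := (List.range rv.toNat).foldl (fun X _ => pvNlFscxV2 X key n) st.2
      (st.1 ++ [PySem.Int.bxor P X], X)) ([], key)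

-- ===== PORT B =====
-- jump(X): advance the state r rounds (B's inner helper)
def pvJump (key rv n X : Int) : Int :=
  (List.range rv.toNat).foldl (fun X _ => pvNlFscxV2 X key n) X

-- the while loop: extend the orbit until it closes or covers len(P_list) words.
-- fuel = number of loop iterations still allowed (= m + 1 - len(orbit), the loop guard).
def pvBuildOrbit (g : Int → Int) : Nat → PySem.Dict Int Int → List Int →
    (List Int × Option (Int × Int))
  | 0, _, orbit => (orbit, none)
  | fuel + 1, seen, orbit =>
    let X := g (orbit.getLast?.getD 0)          -- orbit[-1]; orbit is nonempty throughout
    match seen.get? X with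
    | some s => (orbit, some (s, (orbit.length : Int) - s))
    | none => pvBuildOrbit g fuel (seen.insert X (orbit.length : Int)) (orbit ++ [X])

-- word(j): jump^j(key), read off the stored orbit (via its cycle when j is past the end)
def pvWord (orbit : List Int) (cyc : Option (Int × Int)) (j : Int) : Int :=
  if j < PySem.List.len orbit then PySem.List.pyGetD orbit j 0
  else match cyc with
    | some (s, p) => PySem.List.pyGetD orbit (s + PySem.Int.mod (j - s) p) 0
    | none => 0   -- unreachable: cyc is set whenever the orbit is shorter than m + 1

def hske_enc_revolve_v2_alt (P_list : List Int) (key : Int) (r : Option Int) (n : Int) : List Int × Int :=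
  let rv : Int := match r with | none => n >>> (2 : Nat) | some rv => rv
  let oc := pvBuildOrbit (pvJump key rv n) P_list.length (PySem.Dict.ofList [(key, 0)]) [key]
  let E_list := (PySem.List.enumerate P_list 0).map
      (fun p => PySem.Int.bxor p.2 (pvWord oc.1 oc.2 (p.1 + 1)))
  (E_list, pvWord oc.1 oc.2 (PySem.List.len P_list))

-- ===== PRECONDITION & SPEC =====
-- Pre_ excludes exactly the inputs where the Python raises (nonpositive width n with a
-- positive round count and a nonempty list: '1 << n' / negative shift amounts raise).
def Pre_hske_enc_revolve_v2 (P_list : List Int) (key : Int) (r : Option Int) (n : Int) : Prop :=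
  0 < n ∨ P_list = [] ∨ (r.getD 0) ≤ 0
instance (P_list : List Int) (key : Int) (r : Option Int) (n : Int) : Decidable (Pre_hske_enc_revolve_v2 P_list key r n) := by unfold Pre_hske_enc_revolve_v2; infer_instance
def pvWitness_hske_enc_revolve_v2 : List Int × Int × Option Int × Int := ([7, -3], 5, some 2, 8)

def Spec_hske_enc_revolve_v2 (P_list : List Int) (key : Int) (r : Option Int) (n : Int) (out : List Int × Int) : Prop := out = hske_enc_revolve_v2_alt P_list key r n
instance (P_list : List Int) (key : Int) (r : Option Int) (n : Int) (out : List Int × Int) : Decidable (Spec_hske_enc_revolve_v2 P_list key r n out) := by unfold Spec_hske_enc_revolve_v2; infer_instance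

-- ===== CLAIM (what is proved, stated in full; the proofs are below) =====
def Claim_equal_hske_enc_revolve_v2 : Prop := ∀ (P_list : List Int) (key : Int) (r : Option Int) (n : Int), Dom_hske_enc_revolve_v2 P_list key r n → Pre_hske_enc_revolve_v2 P_list key r n → Spec_hske_enc_revolve_v2 P_list key r n (hske_enc_revolve_v2 P_list key r n)

-- ===== LEMMAS AND PROOFS =====

-- the true orbit: [g^0 key, …, g^(L-1) key]
def pvOrbitOf (g : Int → Int) (key : Int) (L : Nat) : List Int :=
  (List.range L).map (fun j => g^[j] key)

theorem pv_iterate_period (g : Int → Int) (key : Int) (s p : Nat) (hp : 0 < p)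
    (h : g^[s + p] key = g^[s] key) : ∀ k, g^[s + k] key = g^[s + k % p] key := by
  intro k
  induction k using Nat.strong_induction_on with
  | _ k ih =>
    by_cases hk : k < p
    · rw [Nat.mod_eq_of_lt hk]
    · have hk' : k - p < k := by omega
      have h1 : s + k = (k - p) + (s + p) := by omega
      have h2 : g^[s + k] key = g^[s + (k - p)] key := by
        rw [h1, Function.iterate_add_apply, h, ← Function.iterate_add_apply]
        congr 1; omega
      have h3 : (k - p) % p = k % p := by
        conv_rhs => rw [show k = (k - p) + p by omega]
        rw [Nat.add_mod_right]
      rw [h2, ih _ hk', h3]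

theorem pvWord_cyc (g : Int → Int) (key : Int) (L sn : Nat) (hs : sn < L) (j : Nat)
    (hcyc : g^[L] key = g^[sn] key) :
    pvWord (pvOrbitOf g key L) (some ((sn : Int), (L : Int) - (sn : Int))) (j : Nat) = g^[j] key := by
  have hlen : (pvOrbitOf g key L).length = L := by simp [pvOrbitOf]
  by_cases hj : j < L
  · simp only [pvWord, PySem.List.len_eq, hlen]
    rw [if_pos (by exact_mod_cast hj)]
    simp [pvOrbitOf, PySem.List.pyGetD_natCast, List.getD_eq_getElem?_getD, hj]
  · simp only [pvWord, PySem.List.len_eq, hlen]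
    rw [if_neg (by omega)]
    have hp : 0 < L - sn := by omega
    have hmod : ((j : Int) - (sn : Int)) = ((j - sn : Nat) : Int) := by omega
    have hpc : ((L : Int) - (sn : Int)) = ((L - sn : Nat) : Int) := by omega
    rw [hmod, hpc, PySem.Int.mod_natCast]
    have hidx : ((sn : Int) + (((j - sn) % (L - sn) : Nat) : Int)) = ((sn + (j - sn) % (L - sn) : Nat) : Int) := by
      omega
    rw [hidx, PySem.List.pyGetD_natCast]
    have hlt : sn + (j - sn) % (L - sn) < L := by
      have := Nat.mod_lt (j - sn) hp; omega
    have hper : g^[sn + (j - sn)] key = g^[sn + (j - sn) % (L - sn)] key :=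
      pv_iterate_period g key sn (L - sn) hp (by rw [show sn + (L - sn) = L by omega, hcyc]) (j - sn)
    have hjj : sn + (j - sn) = j := by omega
    simp [pvOrbitOf, List.getD_eq_getElem?_getD, hlt, ← hper, hjj]

-- soundness of the memo dict: every stored index names its orbit element
def pvSeenInv (g : Int → Int) (key : Int) (seen : PySem.Dict Int Int) (L : Nat) : Prop :=
  ∀ v s, seen.get? v = some s → ∃ sn : Nat, s = (sn : Int) ∧ sn < L ∧ g^[sn] key = v

theorem pvBuildOrbit_spec (g : Int → Int) (key : Int) :
    ∀ (fuel : Nat) (seen : PySem.Dict Int Int) (L : Nat), 1 ≤ L →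
    pvSeenInv g key seen L →
    ∀ j : Nat, j ≤ (L - 1) + fuel →
    pvWord (pvBuildOrbit g fuel seen (pvOrbitOf g key L)).1
           (pvBuildOrbit g fuel seen (pvOrbitOf g key L)).2 (j : Nat) = g^[j] key := by
  intro fuel
  induction fuel with
  | zero =>
    intro seen L hL _ j hj
    have hjL : j < L := by omega
    have hlen : (pvOrbitOf g key L).length = L := by simp [pvOrbitOf]
    simp only [pvBuildOrbit, pvWord, PySem.List.len_eq, hlen]
    rw [if_pos (by exact_mod_cast hjL)]
    simp [pvOrbitOf, PySem.List.pyGetD_natCast, List.getD_eq_getElem?_getD, hjL]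
  | succ fuel ih =>
    intro seen L hL hinv j hj
    -- the last orbit element is g^(L-1) key, so X = g^L key
    obtain ⟨L', rfl⟩ : ∃ L', L = L' + 1 := ⟨L - 1, by omega⟩
    have hlast : (pvOrbitOf g key (L' + 1)).getLast?.getD 0 = g^[L'] key := by
      simp [pvOrbitOf, List.range_succ]
    have hX : g ((pvOrbitOf g key (L' + 1)).getLast?.getD 0) = g^[L' + 1] key := by
      rw [hlast, ← Function.iterate_succ_apply' g L' key]
    simp only [pvBuildOrbit, hX]
    rcases hget : seen.get? (g^[L' + 1] key) with _ | s
    · -- not seen: append and recurse with L + 1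
      simp only
      have horb : pvOrbitOf g key (L' + 1) ++ [g^[L' + 1] key] = pvOrbitOf g key (L' + 2) := by
        simp [pvOrbitOf, List.range_succ]
      have hlen : ((pvOrbitOf g key (L' + 1)).length : Int) = ((L' + 1 : Nat) : Int) := by
        simp [pvOrbitOf]
      rw [horb, hlen]
      apply ih _ (L' + 2) (by omega)
      · intro v s hvs
        by_cases hv : v = g^[L' + 1] key
        · subst hv
          rw [PySem.Dict.get?_insert_self] at hvs
          exact ⟨L' + 1, by simpa using hvs.symm, by omega, rfl⟩
        · rw [PySem.Dict.get?_insert_of_ne _ _ hv] at hvs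
          obtain ⟨sn, h1, h2, h3⟩ := hinv v s hvs
          exact ⟨sn, h1, by omega, h3⟩
      · omega
    · -- cycle found
      simp only
      obtain ⟨sn, rfl, hsl, hsv⟩ := hinv _ _ hget
      have hlen : ((pvOrbitOf g key (L' + 1)).length : Int) = ((L' + 1 : Nat) : Int) := by
        simp [pvOrbitOf]
      rw [hlen]
      exact pvWord_cyc g key (L' + 1) sn hsl j hsv.symm

-- A's fold, characterized by iterates of the per-element jump g
theorem pvAFold (g : Int → Int) (key : Int) :
    ∀ (ps : List Int) (acc : List Int) (j : Nat),
    ps.foldl (fun (st : List Int × Int) P =>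
        let X := g st.2
        (st.1 ++ [PySem.Int.bxor P X], X)) (acc, g^[j] key)
    = (acc ++ (PySem.List.enumerate ps (j : Int)).map
          (fun p => PySem.Int.bxor p.2 (g^[(p.1 + 1).toNat] key)),
       g^[j + ps.length] key) := by
  intro ps
  induction ps with
  | nil => intro acc j; simp [PySem.List.enumerate]
  | cons P rest ih =>
    intro acc j
    have hg : g (g^[j] key) = g^[j + 1] key := (Function.iterate_succ_apply' g j key).symm
    simp only [List.foldl_cons, hg]
    rw [ih (acc ++ [PySem.Int.bxor P (g^[j + 1] key)]) (j + 1)]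
    rw [PySem.List.enumerate_cons]
    simp only [List.map_cons, List.length_cons, Prod.mk.injEq]
    refine ⟨?_, ?_⟩
    · rw [List.append_assoc, show ((j : Int) + 1) = ((j + 1 : Nat) : Int) by omega]
      congr 3
    · congr 1
      omega

-- both sides for an arbitrary round count rv (r already resolved)
theorem pvEncEq (P_list : List Int) (key n rv : Int) :
    P_list.foldl (fun (st : List Int × Int) P =>
        let X := (List.range rv.toNat).foldl (fun X _ => pvNlFscxV2 X key n) st.2
        (st.1 ++ [PySem.Int.bxor P X], X)) ([], key)
    = (let oc := pvBuildOrbit (pvJump key rv n) P_list.length (PySem.Dict.ofList [(key, 0)]) [key]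
       (((PySem.List.enumerate P_list 0).map
           (fun p => PySem.Int.bxor p.2 (pvWord oc.1 oc.2 (p.1 + 1)))),
        pvWord oc.1 oc.2 (PySem.List.len P_list))) := by
  simp only
  set g : Int → Int := pvJump key rv n with hg
  set m := P_list.length with hm
  have hword : ∀ j : Nat, j ≤ m →
      pvWord (pvBuildOrbit g m (PySem.Dict.ofList [(key, 0)]) [key]).1
             (pvBuildOrbit g m (PySem.Dict.ofList [(key, 0)]) [key]).2 (j : Nat) = g^[j] key := by
    have h1 : [key] = pvOrbitOf g key 1 := by simp [pvOrbitOf]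
    have h2 : PySem.Dict.ofList [(key, (0 : Int))] = PySem.Dict.empty.insert key 0 := by
      simp [PySem.Dict.ofList, PySem.Dict.update]
    rw [h1, h2]
    intro j hj
    apply pvBuildOrbit_spec g key m _ 1 (by omega) _ j (by omega)
    intro v s hvs
    by_cases hv : v = key
    · subst hv
      rw [PySem.Dict.get?_insert_self] at hvs
      exact ⟨0, by simpa using hvs.symm, by omega, rfl⟩
    · rw [PySem.Dict.get?_insert_of_ne _ _ hv] at hvs
      simp [PySem.Dict.get?_empty] at hvs
  have hA : P_list.foldl (fun (st : List Int × Int) P =>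
        let X := (List.range rv.toNat).foldl (fun X _ => pvNlFscxV2 X key n) st.2
        (st.1 ++ [PySem.Int.bxor P X], X)) ([], key)
      = ([] ++ (PySem.List.enumerate P_list (0 : Int)).map
            (fun p => PySem.Int.bxor p.2 (g^[(p.1 + 1).toNat] key)),
         g^[0 + P_list.length] key) := by
    have hk : key = g^[0] key := rfl
    calc P_list.foldl (fun (st : List Int × Int) P =>
        let X := (List.range rv.toNat).foldl (fun X _ => pvNlFscxV2 X key n) st.2
        (st.1 ++ [PySem.Int.bxor P X], X)) ([], key)
        = P_list.foldl (fun (st : List Int × Int) P =>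
            let X := g st.2
            (st.1 ++ [PySem.Int.bxor P X], X)) ([], g^[0] key) := by rw [← hk]; rfl
      _ = _ := pvAFold g key P_list [] 0
  rw [hA]
  simp only [List.nil_append, Nat.zero_add, Prod.mk.injEq]
  refine ⟨?_, ?_⟩
  · apply List.map_congr_left
    intro p hp
    rw [PySem.List.mem_enumerate_iff] at hp
    obtain ⟨k, hk, rfl⟩ := hp
    simp only [Int.zero_add]
    congr 1
    rw [show ((k : Int) + 1) = ((k + 1 : Nat) : Int) by omega,
        hword (k + 1) (by omega)]
    rfl
  · rw [PySem.List.len_eq, ← hm, hword m (le_refl m)]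

-- ===== VERDICT (by name: the statement is the Claim_ definition above) =====
theorem hske_enc_revolve_v2_spec : Claim_equal_hske_enc_revolve_v2 := by
  intro P_list key r n _ _
  unfold Spec_hske_enc_revolve_v2 hske_enc_revolve_v2 hske_enc_revolve_v2_alt
  rcases r with _ | rv0
  · exact pvEncEq P_list key n (n >>> (2 : Nat))
  · exact pvEncEq P_list key n rv0
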